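-- pv_equiv track=rewrite | github.com/yassine-turki/Polytechnique_Courses | CSE102/Project_Lossy_Image_Compression/myjpeg.py | block_splitting
-- ===== SOURCE A (Python) =====
-- def block_splitting(w, h, C) :
--     """Takes a channel C and yields all the 8x8 subblocks of the channel,
--      line by line, from left to right.
--     """
--     for i in range(0,h,8):
--         for j in range(0,w,8):
--             istart=i
--             iend=min(i+8,h)
--             jstart=j
--             jend=min(j+8,w)
--             yield block_splitting_aux(C,istart,iend,jstart,jend)
--
-- def block_splitting_aux(C,linestart,lineend,columnstart,columnend):
--     """Auxilary function for block_splitting()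
--     """
--
--     M=[]
--     for i in range(8):
--         l=[]
--         for j in range(8):
--             cell=C[min(linestart+i,lineend-1)][min(columnstart+j,columnend-1)]
--             l.append(cell)
--         M.append(l)
--     return M
-- ===== SOURCE B (Python) =====
-- def block_splitting(w, h, C):
--     """Yield all 8x8 subblocks of channel C, row-major.
--     Pads C once by edge replication to multiples of 8, then cuts clean
--     8x8 blocks with no per-cell clamping."""
--     if w <= 0 or h <= 0:
--         return
--     W = -(-w // 8) * 8
--     H = -(-h // 8) * 8
--     P = [list(r[:w]) + [r[w - 1]] * (W - w) for r in C[:h]]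
--     P += [list(P[-1]) for _ in range(H - h)]
--     for i in range(0, H, 8):
--         for j in range(0, W, 8):
--             yield [row[j:j + 8] for row in P[i:i + 8]]
-- ===== Notes on version B (the rewrite author's own statement) =====
-- stated objective: simpler
-- what changed: B pads the channel once by replicating the last row and column out to multiples of 8, then cuts clean 8x8 blocks with plain slices, replacing A's per-cell min() clamping in a helper.
import Mathlib
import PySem

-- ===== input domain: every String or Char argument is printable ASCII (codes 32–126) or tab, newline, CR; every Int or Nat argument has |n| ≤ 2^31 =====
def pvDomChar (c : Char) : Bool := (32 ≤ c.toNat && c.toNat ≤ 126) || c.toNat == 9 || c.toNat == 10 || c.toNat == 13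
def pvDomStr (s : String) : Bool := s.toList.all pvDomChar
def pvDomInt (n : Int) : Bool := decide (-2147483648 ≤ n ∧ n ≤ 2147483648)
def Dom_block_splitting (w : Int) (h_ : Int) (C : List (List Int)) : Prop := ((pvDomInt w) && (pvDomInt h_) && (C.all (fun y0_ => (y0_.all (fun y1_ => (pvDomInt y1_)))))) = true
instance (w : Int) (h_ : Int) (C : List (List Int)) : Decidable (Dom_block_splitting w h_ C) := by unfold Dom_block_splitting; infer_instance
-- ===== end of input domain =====

-- B pads the channel once by edge replication to multiples of 8 and then cuts clean 8x8 blocks with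
-- plain slices, instead of A's per-cell min() clamping; return-value equivalence (both are generators,
-- compared as the list of yielded blocks).

-- ===== PORT A =====
def block_splitting_aux (C : List (List Int)) (linestart lineend columnstart columnend : Int) : List (List Int) :=
  (PySem.List.pyRange 0 8 1).foldl (fun M i =>
    M ++ [(PySem.List.pyRange 0 8 1).foldl (fun l j =>
      l ++ [PySem.List.pyGetD (PySem.List.pyGetD C (min (linestart + i) (lineend - 1)) [])
              (min (columnstart + j) (columnend - 1)) 0]) []]) []

def block_splitting (w : Int) (h_ : Int) (C : List (List Int)) : List (List (List Int)) :=
  (PySem.List.pyRange 0 h_ 8).foldl (fun out i =>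
    (PySem.List.pyRange 0 w 8).foldl (fun out j =>
      out ++ [block_splitting_aux C i (min (i + 8) h_) j (min (j + 8) w)]) out) []

-- ===== PORT B =====
-- ceiling to the next multiple of 8: -(-n // 8) * 8
def pvCeil8 (n : Int) : Int := -(PySem.Int.floordiv (-n) 8) * 8

-- list(r[:w]) + [r[w-1]] * (W-w)
def pvPadRow (w W : Int) (r : List Int) : List Int :=
  PySem.List.slice r none (some w) ++ PySem.List.pyRepeat [PySem.List.pyGetD r (w - 1) 0] (W - w)

-- P = [padded rows of C[:h]] + [list(P[-1]) for _ in range(H-h)]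
def pvPad (w h_ W H : Int) (C : List (List Int)) : List (List Int) :=
  let P0 := (PySem.List.slice C none (some h_)).map (pvPadRow w W)
  P0 ++ (PySem.List.pyRange 0 (H - h_) 1).map (fun _ => PySem.List.pyGetD P0 (-1) [])

def block_splitting_alt (w : Int) (h_ : Int) (C : List (List Int)) : List (List (List Int)) :=
  if w ≤ 0 ∨ h_ ≤ 0 then []
  else
    let W := pvCeil8 w
    let H := pvCeil8 h_
    let P := pvPad w h_ W H C
    (PySem.List.pyRange 0 H 8).flatMap (fun i =>
      (PySem.List.pyRange 0 W 8).map (fun j =>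
        (PySem.List.slice P (some i) (some (i + 8))).map (fun row =>
          PySem.List.slice row (some j) (some (j + 8)))))

-- ===== PRECONDITION & SPEC =====
-- Pre_ excludes exactly the inputs where A raises IndexError: w>0 and h>0 but C has fewer than h rows
-- or some of the first h rows has fewer than w entries.
def Pre_block_splitting (w : Int) (h_ : Int) (C : List (List Int)) : Prop :=
  0 < w → 0 < h_ → h_ ≤ (C.length : Int) ∧ ∀ r ∈ C.take h_.toNat, w ≤ (r.length : Int)
instance (w : Int) (h_ : Int) (C : List (List Int)) : Decidable (Pre_block_splitting w h_ C) := by unfold Pre_block_splitting; infer_instance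

def pvWitness_block_splitting : Int × Int × List (List Int) := (2, 1, [[1, 2]])

def Spec_block_splitting (w : Int) (h_ : Int) (C : List (List Int)) (out : List (List (List Int))) : Prop := out = block_splitting_alt w h_ C
instance (w : Int) (h_ : Int) (C : List (List Int)) (out : List (List (List Int))) : Decidable (Spec_block_splitting w h_ C out) := by unfold Spec_block_splitting; infer_instance

-- ===== CLAIM (what is proved, stated in full; the proofs are below) =====
def Claim_equal_block_splitting : Prop := ∀ (w : Int) (h_ : Int) (C : List (List Int)), Dom_block_splitting w h_ C → Pre_block_splitting w h_ C → Spec_block_splitting w h_ C (block_splitting w h_ C)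

-- ===== LEMMAS AND PROOFS =====

-- the value of the (clamped) cell at row r, column c
def pvCell (w h_ : Int) (C : List (List Int)) (r c : Int) : Int :=
  PySem.List.pyGetD (PySem.List.pyGetD C (min r (h_ - 1)) []) (min c (w - 1)) 0

-- one 8x8 block at offset (i, j)
def pvBlk (w h_ : Int) (C : List (List Int)) (i j : Int) : List (List Int) :=
  (PySem.List.pyRange 0 8 1).map (fun di =>
    (PySem.List.pyRange 0 8 1).map (fun dj => pvCell w h_ C (i + di) (j + dj)))

lemma pv_flatMap_congr {α β : Type} {l : List α} {f g : α → List β}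
    (h : ∀ a ∈ l, f a = g a) : l.flatMap f = l.flatMap g := by
  induction l with
  | nil => rfl
  | cons x xs ih =>
    simp only [List.flatMap_cons]
    rw [h x (List.mem_cons_self), ih (fun a ha => h a (List.mem_cons_of_mem _ ha))]

lemma pv_aux_eq (C : List (List Int)) (i h_ j w : Int) :
    block_splitting_aux C i (min (i + 8) h_) j (min (j + 8) w) = pvBlk w h_ C i j := by
  unfold block_splitting_aux pvBlk
  simp only [PySem.List.foldl_append_singleton_eq_map, List.nil_append]
  refine List.map_congr_left (fun di hdi => ?_)
  refine List.map_congr_left (fun dj hdj => ?_)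
  rw [PySem.List.mem_pyRange_one] at hdi hdj
  unfold pvCell
  have ha : min (i + di) (min (i + 8) h_ - 1) = min (i + di) (h_ - 1) := by omega
  have hb : min (j + dj) (min (j + 8) w - 1) = min (j + dj) (w - 1) := by omega
  rw [ha, hb]

lemma pv_A_eq (w h_ : Int) (C : List (List Int)) :
    block_splitting w h_ C =
      (PySem.List.pyRange 0 h_ 8).flatMap (fun i =>
        (PySem.List.pyRange 0 w 8).map (fun j => pvBlk w h_ C i j)) := by
  unfold block_splitting
  simp only [PySem.List.foldl_append_singleton_eq_map]
  rw [PySem.List.foldl_append_eq_flatMap]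
  simp only [List.nil_append]
  exact pv_flatMap_congr (fun i _ => List.map_congr_left (fun j _ => pv_aux_eq C i h_ j w))

lemma pv_ceil8_bounds (n : Int) : n ≤ pvCeil8 n ∧ pvCeil8 n < n + 8 ∧ pvCeil8 n % 8 = 0 := by
  have h := (PySem.Int.neg_floordiv_neg_eq_iff_of_pos
      (a := n) (b := 8) (q := -(PySem.Int.floordiv (-n) 8)) (by norm_num)).mp rfl
  unfold pvCeil8
  omega

lemma pv_pyRange_nonpos (b : Int) (hb : b ≤ 0) : PySem.List.pyRange 0 b 8 = [] := by
  rw [PySem.List.pyRange_of_pos 0 b (by norm_num), if_neg (by omega)]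
  rfl

lemma pv_range8_eq (h_ : Int) (hh : 0 < h_) :
    PySem.List.pyRange 0 h_ 8 = PySem.List.pyRange 0 (pvCeil8 h_) 8 := by
  have hb := pv_ceil8_bounds h_
  rw [PySem.List.pyRange_of_pos 0 h_ (by norm_num),
      PySem.List.pyRange_of_pos 0 (pvCeil8 h_) (by norm_num),
      if_pos hh, if_pos (by omega)]
  congr 2
  omega

lemma pv_mem_pyRange8 {H i : Int} (hmod : H % 8 = 0) (hi : i ∈ PySem.List.pyRange 0 H 8) :
    0 ≤ i ∧ i + 8 ≤ H := by
  rw [PySem.List.pyRange_of_pos 0 H (by norm_num)] at hi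
  simp only [List.mem_map, List.mem_range] at hi
  obtain ⟨k, hk, rfl⟩ := hi
  by_cases hH : 0 < H
  · rw [if_pos hH] at hk; omega
  · rw [if_neg hH] at hk; omega

-- the padded row, as a table of clamped lookups
lemma pv_padRow_eq (w W : Int) (r : List Int) (hw : 0 < w) (hwW : w ≤ W)
    (hlen : w ≤ (r.length : Int)) :
    pvPadRow w W r =
      (List.range W.toNat).map (fun (c : Nat) => PySem.List.pyGetD r (min ((c : Int)) (w - 1)) 0) := by
  unfold pvPadRow
  rw [PySem.List.slice_to r (b := w) (by omega), PySem.List.pyRepeat_singleton]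
  apply List.ext_getElem?
  intro c
  rw [List.getElem?_map]
  by_cases hcW : c < W.toNat
  · rw [List.getElem?_range hcW]
    simp only [Option.map_some]
    by_cases hcw : c < w.toNat
    · rw [List.getElem?_append_left (by rw [List.length_take]; omega), List.getElem?_take,
          if_pos hcw, List.getElem?_eq_getElem (show c < r.length by omega)]
      have hmin : min ((c : Int)) (w - 1) = (c : Int) := by omega
      rw [hmin, PySem.List.pyGetD_eq_getElem r 0 (by omega) (by omega)]
      have hct : ((c : Int)).toNat = c := by omega
      simp [hct]
    · rw [List.getElem?_append_right (by rw [List.length_take]; omega), List.getElem?_replicate,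
          List.length_take]
      rw [if_pos (show c - min w.toNat r.length < (W - w).toNat by omega)]
      have hmin : min ((c : Int)) (w - 1) = w - 1 := by omega
      rw [hmin]
  · have hL : (List.take w.toNat r ++
        List.replicate (W - w).toNat (PySem.List.pyGetD r (w - 1) 0)).length ≤ c := by
      rw [List.length_append, List.length_take, List.length_replicate]; omega
    rw [List.getElem?_eq_none hL, List.getElem?_eq_none (show (List.range W.toNat).length ≤ c by
      rw [List.length_range]; omega)]
    rfl

-- the padded channel is exactly the table of clamped cells
lemma pv_tableP (w h_ : Int) (C : List (List Int)) (hw : 0 < w) (hh : 0 < h_)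
    (hlen : h_ ≤ (C.length : Int)) (hrow : ∀ r ∈ C.take h_.toNat, w ≤ (r.length : Int)) :
    pvPad w h_ (pvCeil8 w) (pvCeil8 h_) C =
      (List.range (pvCeil8 h_).toNat).map (fun (r : Nat) =>
        (List.range (pvCeil8 w).toNat).map (fun (c : Nat) => pvCell w h_ C (r : Int) (c : Int))) := by
  have hWb := pv_ceil8_bounds w
  have hHb := pv_ceil8_bounds h_
  simp only [pvPad]
  rw [PySem.List.slice_to C (b := h_) (by omega)]
  set P0 := (C.take h_.toNat).map (pvPadRow w (pvCeil8 w)) with hP0def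
  have hlenP0 : P0.length = h_.toNat := by
    rw [hP0def, List.length_map, List.length_take]; omega
  have hne : P0 ≠ [] := by
    intro hnil; rw [hnil] at hlenP0; simp at hlenP0; omega
  have hmemtake : ∀ (k : Nat) (hk : k < h_.toNat), C[k]'(by omega) ∈ C.take h_.toNat := by
    intro k hk
    have hk2 : k < (C.take h_.toNat).length := by rw [List.length_take]; omega
    have := List.getElem_mem hk2
    rwa [List.getElem_take] at this
  apply List.ext_getElem?
  intro r
  rw [List.getElem?_map]
  by_cases hr : r < (pvCeil8 h_).toNat
  · rw [List.getElem?_range hr]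
    simp only [Option.map_some]
    by_cases hrh : r < h_.toNat
    · rw [List.getElem?_append_left (by omega), hP0def, List.getElem?_map, List.getElem?_take,
          if_pos hrh, List.getElem?_eq_getElem (show r < C.length by omega)]
      simp only [Option.map_some]
      rw [pv_padRow_eq w (pvCeil8 w) _ hw (by omega) (hrow _ (hmemtake r hrh))]
      refine congrArg some (List.map_congr_left (fun c _ => ?_))
      unfold pvCell
      have hmin : min ((r : Int)) (h_ - 1) = (r : Int) := by omega
      rw [hmin, PySem.List.pyGetD_eq_getElem C [] (by omega) (by omega)]
      have hrt : ((r : Int)).toNat = r := by omega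
      simp [hrt]
    · rw [List.getElem?_append_right (by omega), hlenP0, List.getElem?_map,
          PySem.List.getElem?_pyRange_one]
      rw [if_pos (show r - h_.toNat < (pvCeil8 h_ - h_ - 0).toNat by omega)]
      simp only [Option.map_some]
      have h2 : P0[(h_ - 1).toNat]? =
          some (pvPadRow w (pvCeil8 w) (C[(h_ - 1).toNat]'(by omega))) := by
        rw [hP0def, List.getElem?_map, List.getElem?_take, if_pos (by omega),
            List.getElem?_eq_getElem (show (h_ - 1).toNat < C.length by omega)]
        simp
      have h3 : PySem.List.pyGetD P0 (-1) [] =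
          pvPadRow w (pvCeil8 w) (C[(h_ - 1).toNat]'(by omega)) := by
        rw [PySem.List.pyGetD_neg_one _ _ hne]
        have h4 := List.getLast_eq_getElem hne
        have h5 : P0[(h_ - 1).toNat]? = some (P0.getLast hne) := by
          rw [h4]
          have hix : (h_ - 1).toNat = P0.length - 1 := by omega
          rw [hix]
          exact List.getElem?_eq_getElem _
        rw [h2] at h5
        exact (Option.some.inj h5).symm
      rw [h3, pv_padRow_eq w (pvCeil8 w) _ hw (by omega) (hrow _ (hmemtake _ (by omega)))]
      refine congrArg some (List.map_congr_left (fun c _ => ?_))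
      unfold pvCell
      have hmin : min ((r : Int)) (h_ - 1) = h_ - 1 := by omega
      rw [hmin, PySem.List.pyGetD_eq_getElem C [] (by omega) (by omega)]
  · have hL : (P0 ++ (PySem.List.pyRange 0 (pvCeil8 h_ - h_) 1).map
        (fun _ => PySem.List.pyGetD P0 (-1) [])).length ≤ r := by
      simp [PySem.List.length_pyRange_one]
      omega
    rw [List.getElem?_eq_none hL, List.getElem?_eq_none (show (List.range (pvCeil8 h_).toNat).length ≤ r by
      rw [List.length_range]; omega)]
    rfl

-- slicing 8 consecutive entries out of a range-table
lemma pv_slice_map_range {α : Type} (g : Nat → α) (n : Nat) (a : Int) (ha : 0 ≤ a)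
    (hb : a + 8 ≤ (n : Int)) :
    PySem.List.slice ((List.range n).map g) (some a) (some (a + 8)) =
      (PySem.List.pyRange 0 8 1).map (fun d => g (a + d).toNat) := by
  rw [PySem.List.slice_toNat ((List.range n).map g) (a := a) (b := a + 8) ha (by omega)]
  apply List.ext_getElem?
  intro k
  rw [List.getElem?_take, List.getElem?_map, PySem.List.getElem?_pyRange_one]
  by_cases hk : k < (a + 8).toNat - a.toNat
  · rw [if_pos hk, List.getElem?_drop, List.getElem?_map,
        List.getElem?_range (show a.toNat + k < n by omega), if_pos (by omega)]
    simp only [Option.map_some]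
    have : (a + (0 + (k : Int))).toNat = a.toNat + k := by omega
    rw [this]
  · rw [if_neg hk, if_neg (by omega)]
    simp

lemma pv_blockB (w h_ : Int) (C : List (List Int)) (hw : 0 < w) (hh : 0 < h_)
    (hlen : h_ ≤ (C.length : Int)) (hrow : ∀ r ∈ C.take h_.toNat, w ≤ (r.length : Int))
    (i j : Int) (hi0 : 0 ≤ i) (hi8 : i + 8 ≤ pvCeil8 h_) (hj0 : 0 ≤ j) (hj8 : j + 8 ≤ pvCeil8 w) :
    (PySem.List.slice (pvPad w h_ (pvCeil8 w) (pvCeil8 h_) C) (some i) (some (i + 8))).map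
        (fun row => PySem.List.slice row (some j) (some (j + 8))) = pvBlk w h_ C i j := by
  rw [pv_tableP w h_ C hw hh hlen hrow,
      pv_slice_map_range _ (pvCeil8 h_).toNat i hi0 (by omega), List.map_map]
  unfold pvBlk
  refine List.map_congr_left (fun di hdi => ?_)
  rw [PySem.List.mem_pyRange_one] at hdi
  simp only [Function.comp]
  rw [pv_slice_map_range _ (pvCeil8 w).toNat j hj0 (by omega)]
  refine List.map_congr_left (fun dj hdj => ?_)
  rw [PySem.List.mem_pyRange_one] at hdj
  have h1 : (((i + di).toNat : Int)) = i + di := by omega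
  have h2 : (((j + dj).toNat : Int)) = j + dj := by omega
  rw [h1, h2]

lemma pv_B_eq (w h_ : Int) (C : List (List Int)) (hw : 0 < w) (hh : 0 < h_)
    (hlen : h_ ≤ (C.length : Int)) (hrow : ∀ r ∈ C.take h_.toNat, w ≤ (r.length : Int)) :
    block_splitting_alt w h_ C =
      (PySem.List.pyRange 0 h_ 8).flatMap (fun i =>
        (PySem.List.pyRange 0 w 8).map (fun j => pvBlk w h_ C i j)) := by
  unfold block_splitting_alt
  rw [if_neg (by omega)]
  rw [pv_range8_eq h_ hh, pv_range8_eq w hw]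
  refine pv_flatMap_congr (fun i hi => ?_)
  refine List.map_congr_left (fun j hj => ?_)
  obtain ⟨hi0, hi8⟩ := pv_mem_pyRange8 (pv_ceil8_bounds h_).2.2 hi
  obtain ⟨hj0, hj8⟩ := pv_mem_pyRange8 (pv_ceil8_bounds w).2.2 hj
  exact pv_blockB w h_ C hw hh hlen hrow i j hi0 hi8 hj0 hj8

-- ===== VERDICT (by name: the statement is the Claim_ definition above) =====
theorem block_splitting_spec : Claim_equal_block_splitting := by
  intro w h_ C _hdom hpre
  unfold Spec_block_splitting
  by_cases hw : 0 < w
  · by_cases hh : 0 < h_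
    · obtain ⟨hlen, hrow⟩ := hpre hw hh
      rw [pv_A_eq, pv_B_eq w h_ C hw hh hlen hrow]
    · -- h_ ≤ 0 : both sides are empty
      rw [pv_A_eq, pv_pyRange_nonpos h_ (by omega)]
      unfold block_splitting_alt
      rw [if_pos (by omega)]
      rfl
  · -- w ≤ 0 : both sides are empty
    rw [pv_A_eq]
    unfold block_splitting_alt
    rw [if_pos (by omega)]
    have hempty : ∀ i ∈ PySem.List.pyRange 0 h_ 8,
        (PySem.List.pyRange 0 w 8).map (fun j => pvBlk w h_ C i j) = ([] : List (List (List Int))) := by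
      intro i _
      rw [pv_pyRange_nonpos w (by omega)]
      rfl
    rw [pv_flatMap_congr hempty]
    simp
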